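-- pv_equiv track=rewrite | github.com/cxxxtxxyxx/Algorithm | 프로그래머스/lv2/131127. 할인 행사/할인 행사.py | solution
-- ===== SOURCE A (Python) =====
-- from collections import defaultdict
--
-- def check(discount_cnt, want, number):
--     cnt = 0
--     for i in range(len(want)):
--         if discount_cnt[want[i]] == number[i]:
--             cnt += 1
--
--     return len(number) == cnt
--
-- def solution(want, number, discount):
--     answer = 0
--
--     # step 1: start ~ end (10) 만큼 개수 세기
--     # 조건 만족시 answer += 1
--     # dict[start] -= 1
--     # dict[end] += 1
--
--     discount_cnt = defaultdict(int)
--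
--     for i in range(10):
--         discount_cnt[discount[i]] += 1
--
--
--     start = 0
--     end = 9
--     while end < len(discount):
--         if check(discount_cnt, want, number):
--             answer += 1
--
--         discount_cnt[discount[start]] -= 1
--         start += 1
--         end += 1
--
--         if end >= len(discount):
--             break
--
--         discount_cnt[discount[end]] += 1
--
--
--     return answer
-- ===== SOURCE B (Python) =====
-- from collections import Counter, deque
--
-- def window_matches(window, want, number):
--     cnt = Counter(window)
--     matched = sum(cnt[want[i]] == number[i] for i in range(len(want)))
--     return matched == len(number)
--
-- def solution(want, number, discount):
--     window = deque((discount[i] for i in range(10)), maxlen=10)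
--     answer = 1 if window_matches(window, want, number) else 0
--     for day in discount[10:]:
--         window.append(day)
--         if window_matches(window, want, number):
--             answer += 1
--     return answer
-- ===== Notes on version B (the rewrite author's own statement) =====
-- stated objective: alternative
-- what changed: B replaces A's incrementally maintained sliding defaultdict (manual start/end pointers with +=/-= count updates and a separate check pass) by a deque(maxlen=10) of the current window's days with a fresh Counter rebuilt per window, folding the window count in one pass over the remaining days.
import Mathlib
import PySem

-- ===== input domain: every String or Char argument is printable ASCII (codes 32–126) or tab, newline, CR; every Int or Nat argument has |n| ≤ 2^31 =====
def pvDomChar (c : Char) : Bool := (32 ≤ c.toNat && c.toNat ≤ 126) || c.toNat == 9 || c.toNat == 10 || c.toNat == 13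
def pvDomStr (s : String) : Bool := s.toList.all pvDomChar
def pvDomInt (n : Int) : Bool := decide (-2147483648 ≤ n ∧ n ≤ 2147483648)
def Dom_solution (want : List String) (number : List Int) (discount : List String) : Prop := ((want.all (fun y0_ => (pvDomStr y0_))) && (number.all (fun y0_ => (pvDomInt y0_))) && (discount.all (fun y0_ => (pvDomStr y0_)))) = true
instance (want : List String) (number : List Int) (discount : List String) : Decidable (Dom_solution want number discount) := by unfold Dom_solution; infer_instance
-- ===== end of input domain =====

-- B keeps the current 10-day window in a deque(maxlen=10) and rebuilds a fresh Counter per window,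
-- instead of A's incrementally maintained sliding defaultdict (objective: alternative; equal return values on Pre_).


-- ===== PORT A =====
-- A's check: counts indices i with discount_cnt[want[i]] == number[i]; the defaultdict read is
-- modelled by getD _ 0 (value-identical; the side-effecting 0-insert never changes any later getD).
-- Indexing uses List.getD: exact for the in-range accesses Pre_solution admits (A raises outside).
def checkA (d : PySem.Dict String Int) (want : List String) (number : List Int) : Bool :=
  let cnt := (List.range want.length).foldl
    (fun cnt i => if d.getD (want.getD i "") 0 == number.getD i 0 then cnt + 1 else cnt) (0 : Int)
  decide ((number.length : Int) = cnt)

-- A's while loop; fin is `end`; recursion on the distance from `end` to len(discount)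
def loopA (want : List String) (number : List Int) (discount : List String)
    (d : PySem.Dict String Int) (start fin : Nat) (answer : Int) : Int :=
  if fin < discount.length then
    let answer := if checkA d want number then answer + 1 else answer
    let d := d.modify (discount.getD start "") 0 (· - 1)
    let start := start + 1
    let fin := fin + 1
    if discount.length ≤ fin then answer
    else loopA want number discount (d.modify (discount.getD fin "") 0 (· + 1)) start fin answer
  else answer
termination_by discount.length - fin

def solution (want : List String) (number : List Int) (discount : List String) : Int :=
  let discount_cnt := (List.range 10).foldl
    (fun d i => d.modify (discount.getD i "") 0 (· + 1)) PySem.Dict.empty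
  loopA want number discount discount_cnt 0 9 0

-- ===== PORT B =====
-- B's per-window check: matched = sum(cnt[want[i]] == number[i] for i in range(len(want)));
-- indexing via List.getD is exact for the in-range accesses Pre_solution admits (B raises outside, like A)
def windowMatches (window : List String) (want : List String) (number : List Int) : Bool :=
  let cnt := PySem.Dict.counter window
  let matched := ((List.range want.length).map
    (fun i => if cnt.getD (want.getD i "") 0 == number.getD i 0 then (1 : Int) else 0)).sum
  decide (matched = (number.length : Int))

-- deque.append on a deque with maxlen=10: evict from the left when full
def dequeAppend10 (w : List String) (day : String) : List String :=
  let w' := w ++ [day]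
  if 10 < w'.length then w'.drop (w'.length - 10) else w'

def solution_alt (want : List String) (number : List Int) (discount : List String) : Int :=
  -- deque((discount[i] for i in range(10)), maxlen=10); getD is exact for the in-range reads Pre_ admits
  let window := (List.range 10).map (fun i => discount.getD i "")
  let answer : Int := if windowMatches window want number then 1 else 0
  ((PySem.List.slice discount (some (10 : Int)) none).foldl
    (fun (st : List String × Int) day =>
      let w := dequeAppend10 st.1 day
      (w, if windowMatches w want number then st.2 + 1 else st.2))
    (window, answer)).2

-- ===== PRECONDITION & SPEC =====
-- Pre_ excludes exactly the inputs where A raises IndexError: fewer than 10 discount days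
-- (A reads discount[0..9] up front) or want longer than number (check reads number[i] for i < len(want)).
def Pre_solution (want : List String) (number : List Int) (discount : List String) : Prop :=
  10 ≤ discount.length ∧ want.length ≤ number.length
instance (want : List String) (number : List Int) (discount : List String) : Decidable (Pre_solution want number discount) := by unfold Pre_solution; infer_instance

def pvWitness_solution : List String × List Int × List String :=
  (["a"], [3], ["a", "b", "a", "b", "a", "c", "a", "c", "b", "b"])

def Spec_solution (want : List String) (number : List Int) (discount : List String) (out : Int) : Prop := out = solution_alt want number discount
instance (want : List String) (number : List Int) (discount : List String) (out : Int) : Decidable (Spec_solution want number discount out) := by unfold Spec_solution; infer_instance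

-- ===== CLAIM (what is proved, stated in full; the proofs are below) =====
def Claim_equal_solution : Prop := ∀ (want : List String) (number : List Int) (discount : List String), Dom_solution want number discount → Pre_solution want number discount → Spec_solution want number discount (solution want number discount)


-- ===== LEMMAS AND PROOFS =====

-- the per-window predicate both programs decide
def winP (want : List String) (number : List Int) (discount : List String) (start : Nat) : Bool :=
  windowMatches ((discount.drop start).take 10) want number

-- the first n positions read through getD are the n-element prefix
lemma map_range_getD (discount : List String) (n : Nat) (hn : n ≤ discount.length) :
    (List.range n).map (fun i => discount.getD i "") = discount.take n := by
  apply List.ext_getElem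
  · simp; omega
  · intro i h1 h2
    have h1' : i < n := by simpa using h1
    simp only [List.getElem_map, List.getElem_range, List.getElem_take]
    exact List.getD_eq_getElem _ _ (by omega)

-- window(s) starts with day s
lemma window_cons (discount : List String) (s : Nat) (hs : s < discount.length) :
    (discount.drop s).take 10 = discount[s] :: ((discount.drop (s + 1)).take 9) := by
  rw [List.drop_eq_getElem_cons hs]
  rfl

-- window(s+1) ends with day s+10
lemma window_snoc (discount : List String) (s : Nat) (h : s + 10 < discount.length) :
    (discount.drop (s + 1)).take 10
      = ((discount.drop (s + 1)).take 9) ++ [discount[s + 10]] := by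
  rw [List.take_add_one]
  congr 1
  have h9 : 9 < (discount.drop (s + 1)).length := by simp; omega
  rw [List.getElem?_eq_getElem h9]
  simp

-- checkA agrees with B's window check whenever d's lookups are the window's counts
lemma check_eq (want : List String) (number : List Int) (w : List String)
    (d : PySem.Dict String Int)
    (hd : ∀ k, d.getD k 0 = (w.count k : Int)) :
    checkA d want number = windowMatches w want number := by
  simp only [checkA, windowMatches]
  rw [PySem.List.foldl_if_add_one, PySem.List.sum_map_ite_one_zero]
  simp only [zero_add]
  have hp : (List.range want.length).countP
      (fun i => d.getD (want.getD i "") 0 == number.getD i 0)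
        = (List.range want.length).countP
      (fun i => (PySem.Dict.counter w).getD (want.getD i "") 0 == number.getD i 0) := by
    apply List.countP_congr
    intro i _
    rw [hd, PySem.Dict.getD_counter]
  rw [hp]
  simp [eq_comm]

-- the initial dict holds the counts of the first 10 days
lemma init_counts (discount : List String) (h10 : 10 ≤ discount.length) (k : String) :
    ((List.range 10).foldl (fun d i => d.modify (discount.getD i "") 0 (· + 1))
        PySem.Dict.empty).getD k 0
      = ((discount.take 10).count k : Int) := by
  calc ((List.range 10).foldl (fun d i => d.modify (discount.getD i "") 0 (· + 1))
          PySem.Dict.empty).getD k 0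
      = (((List.range 10).map (fun i => discount.getD i "")).foldl
          (fun d x => d.modify x 0 (· + 1)) PySem.Dict.empty).getD k 0 := by
        rw [List.foldl_map]
    _ = ((discount.take 10).count k : Int) := by
        rw [map_range_getD discount 10 h10, PySem.Dict.getD_foldl_modify_add_one]
        simp

-- window shift: counts of window(start+1) from counts of window(start)
lemma shift_counts (discount : List String) (start : Nat) (d : PySem.Dict String Int)
    (h : start + 10 < discount.length)
    (hd : ∀ k, d.getD k 0 = (((discount.drop start).take 10).count k : Int)) (k : String) :
    (((d.modify (discount.getD start "") 0 (· - 1)).modify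
        (discount.getD (start + 10) "") 0 (· + 1)).getD k 0)
      = (((discount.drop (start + 1)).take 10).count k : Int) := by
  have hs : start < discount.length := by omega
  have hcons := window_cons discount start hs
  have hsnoc := window_snoc discount start h
  have hd' : ∀ k, d.getD k 0
      = ((discount[start] :: ((discount.drop (start + 1)).take 9)).count k : Int) := by
    intro k; rw [hd, hcons]
  have hg1 : discount.getD start "" = discount[start] := List.getD_eq_getElem _ _ hs
  have hg2 : discount.getD (start + 10) "" = discount[start + 10] :=
    List.getD_eq_getElem _ _ (by omega)
  rw [hg1, hg2, hsnoc]
  by_cases hk2 : k = discount[start + 10]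
  · subst hk2
    rw [PySem.Dict.getD_modify_self]
    by_cases hk1 : discount[start + 10] = discount[start]
    · rw [hk1, PySem.Dict.getD_modify_self, hd']
      simp [List.count_append]
    · rw [PySem.Dict.getD_modify_of_ne _ _ _ hk1, hd']
      simp [List.count_append, Ne.symm hk1]
  · rw [PySem.Dict.getD_modify_of_ne _ _ _ hk2]
    by_cases hk1 : k = discount[start]
    · subst hk1
      rw [PySem.Dict.getD_modify_self, hd']
      simp [List.count_append, Ne.symm hk2]
    · rw [PySem.Dict.getD_modify_of_ne _ _ _ hk1, hd']
      simp [List.count_append, Ne.symm hk1, Ne.symm hk2]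

-- main loop invariant (A): loopA adds the number of matching windows from `start` on
lemma loopA_spec (want : List String) (number : List Int) (discount : List String) :
    ∀ (m start : Nat) (d : PySem.Dict String Int) (answer : Int),
      m = discount.length - (start + 9) →
      (∀ k, d.getD k 0 = (((discount.drop start).take 10).count k : Int)) →
      loopA want number discount d start (start + 9) answer
        = answer + ((List.range' start m).countP (winP want number discount) : Int) := by
  intro m
  induction m with
  | zero =>
    intro start d answer hm hd
    rw [loopA]
    have : ¬ (start + 9 < discount.length) := by omega
    simp [this]
  | succ m ih =>
    intro start d answer hm hd
    rw [loopA]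
    have hlt : start + 9 < discount.length := by omega
    have hchk : checkA d want number = winP want number discount start := by
      unfold winP
      exact check_eq want number _ d hd
    by_cases hend : discount.length ≤ start + 9 + 1
    · -- last iteration: discount.length = start + 10, m = 0
      have hm0 : m = 0 := by omega
      subst hm0
      simp only [hlt, if_pos, hend, if_false]
      rw [hchk]
      simp [List.range'_succ, List.countP_cons]
      by_cases hP : winP want number discount start <;> simp [hP]
    · have h10 : start + 10 < discount.length := by omega
      simp only [hlt, if_pos, hend, if_false]
      have hd' := shift_counts discount start d h10 hd
      have harg : start + 9 + 1 = start + 10 := by omega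
      rw [harg]
      have := ih (start + 1) (((d.modify (discount.getD start "") 0 (· - 1)).modify
          (discount.getD (start + 10) "") 0 (· + 1)))
          (if checkA d want number then answer + 1 else answer) (by omega) hd'
      have harg2 : start + 1 + 9 = start + 10 := by omega
      rw [harg2] at this
      rw [this, hchk, List.range'_succ, List.countP_cons]
      by_cases hP : winP want number discount start <;> simp [hP] <;> ring

-- main loop invariant (B): the fold over the remaining days adds the matching windows after j
lemma loopB_spec (want : List String) (number : List Int) (discount : List String) :
    ∀ (m j : Nat) (window : List String) (answer : Int),
      m = discount.length - (10 + j) →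
      j + 10 ≤ discount.length →
      window = (discount.drop j).take 10 →
      ((discount.drop (10 + j)).foldl
          (fun (st : List String × Int) day =>
            let w := dequeAppend10 st.1 day
            (w, if windowMatches w want number then st.2 + 1 else st.2))
          (window, answer)).2
        = answer + ((List.range' (j + 1) m).countP (winP want number discount) : Int) := by
  intro m
  induction m with
  | zero =>
    intro j window answer hm _ _
    have : discount.drop (10 + j) = [] := List.drop_eq_nil_of_le (by omega)
    rw [this]
    simp
  | succ m ih =>
    intro j window answer hm hj hwin
    have hlt : 10 + j < discount.length := by omega
    rw [List.drop_eq_getElem_cons hlt, List.foldl_cons]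
    have hwlen : window.length = 10 := by
      rw [hwin, List.length_take, List.length_drop]; omega
    have hidx : (10 : Nat) + j = j + 10 := by omega
    have hjlt : j < discount.length := by omega
    have hw : dequeAppend10 window discount[10 + j] = (discount.drop (j + 1)).take 10 := by
      simp only [hidx]
      simp only [dequeAppend10, List.length_append, hwlen, List.length_cons, List.length_nil]
      norm_num
      rw [hwin, window_cons discount j hjlt, window_snoc discount j (by omega)]
      simp
    simp only [hw]
    have hP : windowMatches ((discount.drop (j + 1)).take 10) want number
        = winP want number discount (j + 1) := rfl
    rw [hP]
    have harg : 10 + j + 1 = 10 + (j + 1) := by omega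
    have := ih (j + 1) ((discount.drop (j + 1)).take 10)
        (if winP want number discount (j + 1) then answer + 1 else answer)
        (by omega) (by omega) rfl
    rw [harg, this, List.range'_succ, List.countP_cons]
    by_cases hQ : winP want number discount (j + 1) <;> simp [hQ] <;> ring

-- ===== VERDICT (by name: the statement is the Claim_ definition above) =====
theorem solution_spec : Claim_equal_solution := by
  intro want number discount _ hpre
  obtain ⟨h10, -⟩ := hpre
  unfold Spec_solution solution solution_alt
  have hinit := init_counts discount h10
  have hA := loopA_spec want number discount (discount.length - 9) 0
    ((List.range 10).foldl (fun d i => d.modify (discount.getD i "") 0 (· + 1)) PySem.Dict.empty)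
    0 (by omega) (by simpa using hinit)
  simp only [Nat.zero_add] at hA
  have hslice : PySem.List.slice discount (some (10 : Int)) none = discount.drop 10 := by
    simpa using PySem.List.slice_from_natCast discount 10
  have hwin0 : (List.range 10).map (fun i => discount.getD i "") = (discount.drop 0).take 10 := by
    rw [List.drop_zero]; exact map_range_getD discount 10 h10
  have hB := loopB_spec want number discount (discount.length - 10) 0
    ((List.range 10).map (fun i => discount.getD i ""))
    (if windowMatches ((List.range 10).map (fun i => discount.getD i "")) want number then 1 else 0)
    (by omega) (by omega) hwin0
  simp only [Nat.add_zero] at hB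
  rw [hA, hslice, hB]
  have hm0 : windowMatches ((List.range 10).map (fun i => discount.getD i "")) want number
      = winP want number discount 0 := by rw [hwin0]; rfl
  have hrange : List.range' 0 (discount.length - 9)
      = 0 :: List.range' 1 (discount.length - 10) := by
    have : discount.length - 9 = (discount.length - 10) + 1 := by omega
    rw [this, List.range'_succ]
  rw [hrange, List.countP_cons, hm0]
  by_cases hP : winP want number discount 0 <;> simp [hP, winP] <;> ring
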